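-- pv_equiv track=rewrite | github.com/garimto81/ebs_github | tools/ai_track/cia/edge_cases.py | bfs_depth
-- ===== SOURCE A (Python) =====
-- def bfs_depth(graph: dict[str, list[str]], start: str, limit: int) -> int:
--     seen: dict[str, int] = {start: 0}
--     queue: list[str] = [start]
--     max_d = 0
--     while queue:
--         n = queue.pop(0)
--         d = seen[n]
--         if d >= limit:
--             continue
--         for m in graph.get(n, []):
--             if m not in seen:
--                 seen[m] = d + 1
--                 max_d = max(max_d, d + 1)
--                 queue.append(m)
--     return max_d
-- ===== SOURCE B (Python) =====
-- def bfs_depth(graph: dict[str, list[str]], start: str, limit: int) -> int: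
--     # Level-synchronous BFS: expand whole frontiers, count levels directly
--     # (no per-node queue, no depth dictionary).
--     seen = {start}
--     frontier = [start]
--     max_d = 0
--     while frontier and max_d < limit:
--         next_frontier = []
--         for n in frontier:
--             for m in graph.get(n, []):
--                 if m not in seen:
--                     seen.add(m)
--                     next_frontier.append(m)
--         if not next_frontier:
--             break
--         max_d += 1
--         frontier = next_frontier
--     return max_d
-- ===== Notes on version B (the rewrite author's own statement) =====
-- stated objective: alternative
-- what changed: Replaced the per-node FIFO queue (pop(0)) and per-node depth dictionary by level-synchronous BFS: a seen set and whole-frontier lists expanded level by level, with the depth counted per level.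
import Mathlib
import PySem

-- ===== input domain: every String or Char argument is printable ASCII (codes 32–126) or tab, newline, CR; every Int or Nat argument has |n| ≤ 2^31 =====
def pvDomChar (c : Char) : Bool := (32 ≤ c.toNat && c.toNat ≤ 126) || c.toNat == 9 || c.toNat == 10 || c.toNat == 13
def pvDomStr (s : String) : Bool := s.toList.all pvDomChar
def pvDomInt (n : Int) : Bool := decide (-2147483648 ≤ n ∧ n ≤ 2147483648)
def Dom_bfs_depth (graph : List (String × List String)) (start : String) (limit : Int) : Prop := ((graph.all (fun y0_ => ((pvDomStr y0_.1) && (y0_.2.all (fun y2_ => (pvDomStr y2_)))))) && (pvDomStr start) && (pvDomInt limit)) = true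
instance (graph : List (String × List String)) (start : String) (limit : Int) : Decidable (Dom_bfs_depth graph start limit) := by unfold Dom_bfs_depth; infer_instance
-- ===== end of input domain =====

-- B replaces A's per-node FIFO queue + depth dictionary by level-synchronous BFS
-- (a seen set and whole-frontier lists, depth counted per level); objective: alternative decomposition.

-- ===== PORT A =====
-- body of A's inner `for m in graph.get(n, []):` loop; state = (seen, queue, max_d), d = depth of the popped node
def pvStepA (d : Int) (st : PySem.Dict String Int × List String × Int) (m : String) :
    PySem.Dict String Int × List String × Int :=
  if (st.1.get? m).isNone then (st.1.insert m (d + 1), st.2.1 ++ [m], max st.2.2 (d + 1)) else st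

-- measure for termination of A's while loop: unseen adjacency-list entries + queue length
def pvUnseen (g : PySem.Dict String (List String)) (seen : PySem.Dict String Int) : Nat :=
  ((g.values.flatten).filter (fun x => (seen.get? x).isNone)).length

theorem pvAdj_mem {g : PySem.Dict String (List String)} {n m : String}
    (h : m ∈ g.getD n []) : m ∈ g.values.flatten := by
  rw [PySem.Dict.getD] at h
  cases hg : g.get? n with
  | none => rw [hg] at h; simp at h
  | some v =>
    rw [hg] at h
    have hi := PySem.Dict.mem_items_of_get?_eq_some g hg
    have hv : v ∈ g.values := by
      simp only [PySem.Dict.values]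
      exact List.mem_map.mpr ⟨(n, v), hi, rfl⟩
    exact List.mem_flatten.mpr ⟨v, hv, h⟩

theorem pvUnseen_insert_lt {g : PySem.Dict String (List String)} {seen : PySem.Dict String Int}
    {m : String} (v : Int) (hm : m ∈ g.values.flatten) (hnone : seen.get? m = none) :
    pvUnseen g (seen.insert m v) < pvUnseen g seen := by
  unfold pvUnseen
  have hsub : ((g.values.flatten).filter (fun x => ((seen.insert m v).get? x).isNone)).Sublist
      ((g.values.flatten).filter (fun x => (seen.get? x).isNone)) := by
    apply List.monotone_filter_right
    intro a ha
    rw [PySem.Dict.get?_insert] at ha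
    by_cases hc : a = m
    · simp [hc] at ha
    · simpa [hc] using ha
  rcases hsub.length_le.lt_or_eq with h | h
  · exact h
  · exfalso
    have heq := hsub.eq_of_length h
    have hmem : m ∈ (g.values.flatten).filter (fun x => (seen.get? x).isNone) :=
      List.mem_filter.mpr ⟨hm, by simp [hnone]⟩
    rw [← heq] at hmem
    simp [List.mem_filter, PySem.Dict.get?_insert_self] at hmem

theorem pvFoldA_mu (g : PySem.Dict String (List String)) (d : Int) :
    ∀ (ms : List String) (seen : PySem.Dict String Int) (q : List String) (md : Int),
      (∀ m ∈ ms, m ∈ g.values.flatten) →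
      pvUnseen g (ms.foldl (pvStepA d) (seen, q, md)).1 + (ms.foldl (pvStepA d) (seen, q, md)).2.1.length
        ≤ pvUnseen g seen + q.length := by
  intro ms
  induction ms with
  | nil => intro seen q md _; simp
  | cons m tl ih =>
    intro seen q md hmem
    simp only [List.foldl_cons]
    by_cases hns : (seen.get? m).isNone
    · rw [show pvStepA d (seen, q, md) m
          = (seen.insert m (d + 1), q ++ [m], max md (d + 1)) by simp [pvStepA, hns]]
      have h1 := ih (seen.insert m (d + 1)) (q ++ [m]) (max md (d + 1))
        (fun x hx => hmem x (List.mem_cons_of_mem _ hx))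
      have h2 := pvUnseen_insert_lt (d + 1) (hmem m List.mem_cons_self)
        (Option.isNone_iff_eq_none.mp hns)
      simp only [List.length_append, List.length_cons, List.length_nil] at h1 ⊢
      omega
    · rw [show pvStepA d (seen, q, md) m = (seen, q, md) by simp [pvStepA, hns]]
      exact ih seen q md (fun x hx => hmem x (List.mem_cons_of_mem _ hx))

-- A's `while queue:` loop
def pvLoopA (g : PySem.Dict String (List String)) (limit : Int)
    (seen : PySem.Dict String Int) (queue : List String) (max_d : Int) : Int :=
  match queue with
  | [] => max_d
  | n :: rest =>
    -- d = seen[n]; every queued node is a key of seen, the .getD 0 only totalizes the lookup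
    let d := (seen.get? n).getD 0
    if d ≥ limit then pvLoopA g limit seen rest max_d
    else
      let st := (g.getD n []).foldl (pvStepA d) (seen, rest, max_d)
      pvLoopA g limit st.1 st.2.1 st.2.2
termination_by pvUnseen g seen + queue.length
decreasing_by
  · simp only [List.length_cons]; omega
  · have h := pvFoldA_mu g ((seen.get? n).getD 0) (g.getD n []) seen rest max_d
      (fun m hm => pvAdj_mem hm)
    simp only [List.length_cons]
    omega

def bfs_depth (graph : List (String × List String)) (start : String) (limit : Int) : Int :=
  pvLoopA (PySem.Dict.ofList graph) limit (PySem.Dict.empty.insert start 0) [start] 0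

-- ===== PORT B =====
-- body of B's inner `for m in graph.get(n, []):` loop; state = (seen, next_frontier)
def pvStepBInner (st : PySem.Set String × List String) (m : String) :
    PySem.Set String × List String :=
  if PySem.Set.contains st.1 m = false then (PySem.Set.add st.1 m, st.2 ++ [m]) else st

-- body of B's `for n in frontier:` loop
def pvStepB (g : PySem.Dict String (List String)) (st : PySem.Set String × List String)
    (n : String) : PySem.Set String × List String :=
  (g.getD n []).foldl pvStepBInner st

-- B's `while frontier and max_d < limit:` loop
def pvLoopB (g : PySem.Dict String (List String)) (limit : Int)
    (seen : PySem.Set String) (frontier : List String) (max_d : Int) : Int :=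
  if frontier = [] ∨ ¬ max_d < limit then max_d
  else
    let st := frontier.foldl (pvStepB g) (seen, [])
    if st.2 = [] then max_d
    else pvLoopB g limit st.1 st.2 (max_d + 1)
termination_by (limit - max_d).toNat
decreasing_by omega

def bfs_depth_alt (graph : List (String × List String)) (start : String) (limit : Int) : Int :=
  pvLoopB (PySem.Dict.ofList graph) limit (PySem.Set.ofList [start]) [start] 0

-- ===== PRECONDITION & SPEC =====
def Spec_bfs_depth (graph : List (String × List String)) (start : String) (limit : Int) (out : Int) : Prop := out = bfs_depth_alt graph start limit
instance (graph : List (String × List String)) (start : String) (limit : Int) (out : Int) : Decidable (Spec_bfs_depth graph start limit out) := by unfold Spec_bfs_depth; infer_instance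

-- ===== CLAIM (what is proved, stated in full; the proofs are below) =====
def Claim_equal_bfs_depth : Prop := ∀ (graph : List (String × List String)) (start : String) (limit : Int), Dom_bfs_depth graph start limit → Spec_bfs_depth graph start limit (bfs_depth graph start limit)

-- ===== LEMMAS AND PROOFS =====

-- A's seen-dict and B's seen-set hold the same nodes
def pvAgree (S : PySem.Dict String Int) (T : PySem.Set String) : Prop :=
  ∀ x : String, (S.get? x).isSome ↔ x ∈ T

theorem pvInner (d : Int) :
    ∀ (ms : List String) (S : PySem.Dict String Int) (T : PySem.Set String)
      (q nf : List String) (md : Int), pvAgree S T →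
    ∃ new : List String,
      (ms.foldl (pvStepA d) (S, q, md)).2.1 = q ++ new ∧
      (ms.foldl pvStepBInner (T, nf)).2 = nf ++ new ∧
      pvAgree (ms.foldl (pvStepA d) (S, q, md)).1 (ms.foldl pvStepBInner (T, nf)).1 ∧
      (∀ x ∈ new, S.get? x = none) ∧
      (∀ x, (ms.foldl (pvStepA d) (S, q, md)).1.get? x
          = if x ∈ new then some (d + 1) else S.get? x) ∧
      (ms.foldl (pvStepA d) (S, q, md)).2.2 = (if new = [] then md else max md (d + 1)) := by
  intro ms
  induction ms with
  | nil =>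
    intro S T q nf md hag
    exact ⟨[], by simp, by simp, hag, by simp, fun x => by simp, by simp⟩
  | cons m tl ih =>
    intro S T q nf md hag
    simp only [List.foldl_cons]
    by_cases hns : (S.get? m).isNone
    · have hnone : S.get? m = none := Option.isNone_iff_eq_none.mp hns
      have hTm : m ∉ T := fun hmT => by have := (hag m).mpr hmT; simp [hnone] at this
      have hTc : PySem.Set.contains T m = false := by
        simpa [PySem.Set.contains] using hTm
      rw [show pvStepA d (S, q, md) m = (S.insert m (d + 1), q ++ [m], max md (d + 1)) by
            simp [pvStepA, hns],
          show pvStepBInner (T, nf) m = (T ++ [m], nf ++ [m]) by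
            simp [pvStepBInner, PySem.Set.add, PySem.Set.contains, hTm]]
      have hag' : pvAgree (S.insert m (d + 1)) (T ++ [m]) := by
        intro x
        rw [PySem.Dict.get?_insert]
        by_cases hx : x = m
        · simp [hx]
        · simp only [List.mem_append, List.mem_singleton, hx, or_false]
          exact hag x
      obtain ⟨new', h1, h2, h3, h4, h5, h6⟩ :=
        ih (S.insert m (d + 1)) (T ++ [m]) (q ++ [m]) (nf ++ [m]) (max md (d + 1)) hag'
      refine ⟨m :: new', ?_, ?_, h3, ?_, ?_, ?_⟩
      · rw [h1, List.append_assoc]; rfl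
      · rw [h2, List.append_assoc]; rfl
      · intro x hx
        rcases List.mem_cons.mp hx with hx | hx
        · rw [hx]; exact hnone
        · have := h4 x hx
          rw [PySem.Dict.get?_insert] at this
          by_cases hxm : x = m
          · rw [hxm]; exact hnone
          · rwa [if_neg hxm] at this
      · intro x
        rw [h5 x, PySem.Dict.get?_insert]
        by_cases hx1 : x ∈ new'
        · simp [hx1, List.mem_cons]
        · by_cases hx2 : x = m <;> simp [hx1, hx2, List.mem_cons]
      · rw [h6]
        have : m :: new' ≠ [] := List.cons_ne_nil m new'
        rcases eq_or_ne new' [] with hn | hn <;>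
          simp [hn, this]
    · have hsome : (S.get? m).isSome := by
        cases h : S.get? m <;> simp [h] at hns ⊢
      have hTm : m ∈ T := (hag m).mp hsome
      have hTc : PySem.Set.contains T m = true := by
        simpa [PySem.Set.contains] using hTm
      rw [show pvStepA d (S, q, md) m = (S, q, md) by simp [pvStepA, hns],
          show pvStepBInner (T, nf) m = (T, nf) by simp [pvStepBInner, hTm]]
      exact ih S T q nf md hag

theorem pvSkipAll (g : PySem.Dict String (List String)) (limit : Int) :
    ∀ (q : List String) (S : PySem.Dict String Int) (md : Int),
      (∀ n ∈ q, ((S.get? n).getD 0) ≥ limit) → pvLoopA g limit S q md = md := by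
  intro q
  induction q with
  | nil => intro S md _; rw [pvLoopA]
  | cons n rest ih =>
    intro S md h
    rw [pvLoopA]
    simp only [h n List.mem_cons_self, if_pos]
    exact ih S md (fun x hx => h x (List.mem_cons_of_mem _ hx))

theorem pvLevel (g : PySem.Dict String (List String)) (limit D : Int) (hD : D < limit) :
    ∀ (F : List String) (S : PySem.Dict String Int) (T : PySem.Set String)
      (nf : List String) (md : Int), pvAgree S T →
      (∀ n ∈ F, S.get? n = some D) →
      (∀ x ∈ nf, S.get? x = some (D + 1)) →
      md = (if nf = [] then D else D + 1) →
    ∃ S' : PySem.Dict String Int,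
      pvAgree S' (F.foldl (pvStepB g) (T, nf)).1 ∧
      (∀ x ∈ (F.foldl (pvStepB g) (T, nf)).2, S'.get? x = some (D + 1)) ∧
      pvLoopA g limit S (F ++ nf) md
        = pvLoopA g limit S' (F.foldl (pvStepB g) (T, nf)).2
            (if (F.foldl (pvStepB g) (T, nf)).2 = [] then D else D + 1) := by
  intro F
  induction F with
  | nil =>
    intro S T nf md hag hF hnf hmd
    exact ⟨S, hag, hnf, by rw [hmd]; rfl⟩
  | cons n F' ih =>
    intro S T nf md hag hF hnf hmd
    obtain ⟨new, h1, h2, h3, h4, h5, h6⟩ :=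
      pvInner D (g.getD n []) S T (F' ++ nf) nf md hag
    set stA := (g.getD n []).foldl (pvStepA D) (S, F' ++ nf, md) with hstA
    set stB := (g.getD n []).foldl pvStepBInner (T, nf) with hstB
    have hdn : (S.get? n).getD 0 = D := by rw [hF n List.mem_cons_self]; rfl
    have hmdle : md ≤ D + 1 := by rw [hmd]; split <;> omega
    have hmd2 : stA.2.2 = (if nf ++ new = [] then D else D + 1) := by
      rw [h6]
      rcases eq_or_ne new [] with hn | hn
      · simp [hn, hmd]
      · have : nf ++ new ≠ [] := by simp [hn]
        simp [hn, this]
        omega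
    have hF' : ∀ x ∈ F', stA.1.get? x = some D := by
      intro x hx
      rw [h5 x]
      have : x ∉ new := by
        intro hxn
        have := h4 x hxn
        rw [hF x (List.mem_cons_of_mem _ hx)] at this
        simp at this
      simp only [this, if_false]
      exact hF x (List.mem_cons_of_mem _ hx)
    have hnf' : ∀ x ∈ nf ++ new, stA.1.get? x = some (D + 1) := by
      intro x hx
      rw [h5 x]
      rcases List.mem_append.mp hx with hx | hx
      · have : x ∉ new := by
          intro hxn
          have := h4 x hxn
          rw [hnf x hx] at this
          simp at this
        simp only [this, if_false]
        exact hnf x hx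
      · simp [hx]
    obtain ⟨S', hag', hdep', heq'⟩ := ih stA.1 stB.1 (nf ++ new) stA.2.2 h3 hF' hnf' hmd2
    have hstB2 : (stB.1, nf ++ new) = stB := by rw [← h2]
    rw [hstB2] at hag' hdep' heq'
    refine ⟨S', ?_, ?_, ?_⟩
    · simpa [List.foldl_cons, pvStepB, ← hstB] using hag'
    · simpa [List.foldl_cons, pvStepB, ← hstB] using hdep'
    · rw [List.cons_append, pvLoopA]
      simp only [hdn, if_neg (not_le.mpr hD)]
      rw [show pvLoopA g limit stA.1 stA.2.1 stA.2.2
            = pvLoopA g limit stA.1 (F' ++ (nf ++ new)) stA.2.2 by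
          rw [h1, List.append_assoc]]
      rw [heq']
      simp [List.foldl_cons, pvStepB, ← hstB]

theorem pvMainAux (g : PySem.Dict String (List String)) (limit : Int) :
    ∀ (k : Nat) (T : PySem.Set String) (F : List String) (md : Int)
      (S : PySem.Dict String Int), (limit - md).toNat ≤ k →
      pvAgree S T → (∀ n ∈ F, S.get? n = some md) →
      pvLoopA g limit S F md = pvLoopB g limit T F md := by
  intro k
  induction k with
  | zero =>
    intro T F md S hk hag hF
    have hlim : ¬ md < limit := by omega
    rw [pvLoopB, if_pos (Or.inr hlim)]
    exact pvSkipAll g limit F S md (fun n hn => by rw [hF n hn]; simp only [Option.getD_some]; omega)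
  | succ k ih =>
    intro T F md S hk hag hF
    rw [pvLoopB]
    by_cases hstop : F = [] ∨ ¬ md < limit
    · rw [if_pos hstop]
      rcases hstop with hF0 | hlim
      · rw [hF0, pvLoopA]
      · exact pvSkipAll g limit F S md (fun n hn => by rw [hF n hn]; simp only [Option.getD_some]; omega)
    · rw [if_neg hstop]
      rw [not_or, not_not] at hstop
      obtain ⟨hFne, hlim⟩ := hstop
      obtain ⟨S', hag', hdep', heq'⟩ :=
        pvLevel g limit md hlim F S T [] md hag hF (by simp) (by simp)
      rw [List.append_nil] at heq'
      by_cases hb : (F.foldl (pvStepB g) (T, [])).2 = []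
      · rw [if_pos hb, heq', hb, pvLoopA]
        simp
      · rw [if_neg hb, heq', if_neg hb]
        exact ih (F.foldl (pvStepB g) (T, [])).1 (F.foldl (pvStepB g) (T, [])).2 (md + 1) S'
          (by omega) hag' hdep'

-- ===== VERDICT (by name: the statement is the Claim_ definition above) =====
theorem bfs_depth_spec : Claim_equal_bfs_depth := by
  intro graph start limit _
  unfold Spec_bfs_depth bfs_depth bfs_depth_alt
  have hofl : PySem.Set.ofList [start] = [start] := rfl
  rw [hofl]
  apply pvMainAux (PySem.Dict.ofList graph) limit (limit - 0).toNat [start] [start] 0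
      (PySem.Dict.empty.insert start 0) le_rfl
  · intro x
    rw [PySem.Dict.get?_insert]
    by_cases hx : x = start <;> simp [hx, PySem.Dict.get?_empty]
  · intro n hn
    rw [List.mem_singleton.mp hn, PySem.Dict.get?_insert_self]
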